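-- pv_equiv track=rewrite | github.com/wr0om/Autonomous-Drone-Navigation | Project_file/controllers/my_controller/my_controller.py | bin_sensor_values
-- ===== SOURCE A (Python) =====
-- def bin_sensor_values(sensor_values):
--     no_obstacle_thresh=75
--     obstacle_proximity_thresh=175
--     obstacle_close_thresh=400
--     bin_sensors=[]
--     for val in sensor_values:
--         #code for if val < 75 then  val=0 elif 75<=val<175 then val=1 elif 175<=val<1000 then val=2 elif val>1000 then val=3
--         if val<no_obstacle_thresh:
--             val=0
--         elif val>=no_obstacle_thresh and val<obstacle_proximity_thresh:
--             val=1
--         elif val>=obstacle_proximity_thresh and val<obstacle_close_thresh: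
--             val=2
--         elif val>=obstacle_close_thresh:
--             val=3
--         bin_sensors.append(val)
--
--     return bin_sensors
-- ===== SOURCE B (Python) =====
-- def bin_sensor_values(sensor_values):
--     # Staged passes: start with all bins at level 0, then sweep once per
--     # threshold, promoting every element that reaches that threshold.
--     bins = [0] * len(sensor_values)
--     for thresh in (75, 175, 400):
--         bins = [b + (v >= thresh) for b, v in zip(bins, sensor_values)]
--     return bins
-- ===== Notes on version B (the rewrite author's own statement) =====
-- stated objective: alternative
-- what changed: Replaces the element-major loop with an if-elif cascade by a threshold-major algorithm: three staged sweeps over the whole list, each promoting every element that reaches that threshold.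
import Mathlib
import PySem

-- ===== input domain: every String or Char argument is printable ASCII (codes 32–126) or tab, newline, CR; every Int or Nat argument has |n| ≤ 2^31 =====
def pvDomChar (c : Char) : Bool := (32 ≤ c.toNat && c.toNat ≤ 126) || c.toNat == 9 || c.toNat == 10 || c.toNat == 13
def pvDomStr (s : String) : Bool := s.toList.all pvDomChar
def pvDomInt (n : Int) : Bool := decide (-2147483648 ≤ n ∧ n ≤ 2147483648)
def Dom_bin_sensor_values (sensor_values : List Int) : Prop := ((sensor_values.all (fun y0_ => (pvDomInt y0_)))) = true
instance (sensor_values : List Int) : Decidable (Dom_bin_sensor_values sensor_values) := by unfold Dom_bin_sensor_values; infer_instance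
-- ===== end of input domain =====

-- ===== PORT A =====
def bin_sensor_values (sensor_values : List Int) : List Int :=
  sensor_values.foldl (fun bin_sensors val =>
    let val :=
      if val < 75 then (0 : Int)
      else if val ≥ 75 ∧ val < 175 then 1
      else if val ≥ 175 ∧ val < 400 then 2
      else if val ≥ 400 then 3
      else val
    bin_sensors ++ [val]) []

-- ===== PORT B =====
-- B: threshold-major staged sweeps instead of A's element-major cascade loop.
def bin_sensor_values_alt (sensor_values : List Int) : List Int :=
  ([75, 175, 400] : List Int).foldl
    (fun bins thresh =>
      List.zipWith (fun b v => b + if v ≥ thresh then 1 else 0) bins sensor_values)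
    (List.replicate sensor_values.length 0)

-- ===== PRECONDITION & SPEC =====
def Spec_bin_sensor_values (sensor_values : List Int) (out : List Int) : Prop := out = bin_sensor_values_alt sensor_values
instance (sensor_values : List Int) (out : List Int) : Decidable (Spec_bin_sensor_values sensor_values out) := by unfold Spec_bin_sensor_values; infer_instance

-- ===== CLAIM =====
def Claim_equal_bin_sensor_values : Prop := ∀ (sensor_values : List Int), Dom_bin_sensor_values sensor_values → Spec_bin_sensor_values sensor_values (bin_sensor_values sensor_values)

-- ===== LEMMAS AND PROOFS =====
-- A's fold appends exactly the per-element bins to the accumulator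
theorem binsens_foldl (xs : List Int) (acc : List Int) :
    List.foldl (fun bin_sensors val =>
      let val :=
        if val < 75 then (0 : Int)
        else if val ≥ 75 ∧ val < 175 then 1
        else if val ≥ 175 ∧ val < 400 then 2
        else if val ≥ 400 then 3
        else val
      bin_sensors ++ [val]) acc xs =
    acc ++ xs.map (fun val =>
      (if val ≥ 75 then (1 : Int) else 0) + (if val ≥ 175 then 1 else 0) + (if val ≥ 400 then 1 else 0)) := by
  induction xs generalizing acc with
  | nil => simp
  | cons x xs ih =>
    simp only [List.foldl_cons, List.map_cons, ih, List.append_assoc, List.cons_append,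
      List.nil_append]
    congr 2
    split_ifs <;> omega

-- B's three staged sweeps compute the same per-element bins
theorem binsens_staged (xs : List Int) :
    bin_sensor_values_alt xs =
    xs.map (fun val =>
      (if val ≥ 75 then (1 : Int) else 0) + (if val ≥ 175 then 1 else 0) + (if val ≥ 400 then 1 else 0)) := by
  unfold bin_sensor_values_alt
  induction xs with
  | nil => rfl
  | cons x xs ih =>
    simp only [List.foldl_cons, List.foldl_nil] at ih ⊢
    simp [List.replicate_succ, List.map_cons, ih]

-- ===== VERDICT =====
theorem bin_sensor_values_spec : Claim_equal_bin_sensor_values := by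
  intro xs _
  unfold Spec_bin_sensor_values bin_sensor_values
  rw [binsens_staged]
  simpa using binsens_foldl xs []
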